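-- pv_equiv track=rewrite | github.com/ThoBoul/Uni-CPM-Project | MU3400_Project_BOULOUSIS_THOMAS_PYTHON_Code.py | FrequencyFinder
-- ===== SOURCE A (Python) =====
-- def FrequencyFinder(List,weight): #finds how many times an element appears in a list and returns a list with this formula [[element1,weight1],[[element2,weight2]...]
--     List.sort() #first, it sorts the list
--     templist=[] #initialise templist
--     templist.append([List[0],(List.count(List[0])*weight)]) #appends the first element of the List as well as how many times it has appeared
--     for i in range (1,len(List)):
--         if not(List[i]==List[i-1]): #repeats the process for the rest of the elements
--             templist.append([List[i],(List.count(List[i])*weight)])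
--     return templist #returns the list with the above formula
-- ===== SOURCE B (Python) =====
-- def FrequencyFinder(List, weight):
--     # Single pass over the sorted list counting runs (no per-element .count() scan).
--     # Like A, this sorts `List` in place (same observable mutation).
--     List.sort()
--     templist = []
--     prev = None
--     run = 0
--     for x in List:
--         if run > 0 and x == prev:
--             run += 1
--         else:
--             if run > 0:
--                 templist.append([prev, run * weight])
--             prev = x
--             run = 1
--     if run > 0:
--         templist.append([prev, run * weight])
--     return templist
-- ===== Notes on version B (the rewrite author's own statement) =====
-- stated objective: faster
-- what changed: A calls List.count inside its loop over the sorted list (a full scan per distinct element, O(n^2) worst case); B makes a single pass over the sorted list counting run lengths, so the inner scan disappears.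
-- crash fix: On the empty list A raises IndexError (it indexes List[0]); B returns []. — e.g. on FrequencyFinder([], 1): A raises IndexError, B returns []
import Mathlib
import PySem

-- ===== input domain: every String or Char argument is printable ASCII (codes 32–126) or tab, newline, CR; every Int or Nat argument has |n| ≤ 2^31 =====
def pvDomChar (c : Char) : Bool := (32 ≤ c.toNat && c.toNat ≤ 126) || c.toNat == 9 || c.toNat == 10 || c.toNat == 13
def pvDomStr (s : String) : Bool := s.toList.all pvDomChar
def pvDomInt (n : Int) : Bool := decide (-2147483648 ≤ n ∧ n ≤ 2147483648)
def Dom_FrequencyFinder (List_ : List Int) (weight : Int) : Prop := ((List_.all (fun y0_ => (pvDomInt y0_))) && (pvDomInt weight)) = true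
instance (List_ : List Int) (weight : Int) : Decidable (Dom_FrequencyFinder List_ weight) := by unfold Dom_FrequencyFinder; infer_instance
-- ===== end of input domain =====

-- B replaces A's per-element List.count scan with a single run-counting pass over the
-- sorted list (objective: faster). Both Pythons sort the argument list in place; the
-- equivalence proved here is about the RETURN value (B performs the same mutation).

-- ===== PORT A =====
-- loop body of A's 'for i in range(1, len(List))'
def pvAStep (L : List Int) (weight : Int) (acc : List (List Int)) (i : Int) : List (List Int) :=
  if ¬ (PySem.List.pyGetD L i 0 = PySem.List.pyGetD L (i - 1) 0) then
    acc ++ [[PySem.List.pyGetD L i 0, (PySem.List.count L (PySem.List.pyGetD L i 0) : Int) * weight]]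
  else acc

-- A's body after the in-place 'List.sort()' (operates on the sorted list L)
def pvABody (L : List Int) (weight : Int) : List (List Int) :=
  (PySem.List.pyRange 1 (PySem.List.len L) 1).foldl (pvAStep L weight)
    ([] ++ [[PySem.List.pyGetD L 0 0, (PySem.List.count L (PySem.List.pyGetD L 0 0) : Int) * weight]])

def FrequencyFinder (List_ : List Int) (weight : Int) : List (List Int) :=
  pvABody (PySem.List.sorted List_ (fun x => x) false) weight

-- ===== PORT B =====
-- B's loop body: state = (templist, prev, run)
def pvBStep (weight : Int) (s : List (List Int) × Option Int × Int) (x : Int) :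
    List (List Int) × Option Int × Int :=
  if 0 < s.2.2 ∧ s.2.1 = some x then (s.1, s.2.1, s.2.2 + 1)
  else ((if 0 < s.2.2 then s.1 ++ [[(s.2.1).getD 0, s.2.2 * weight]] else s.1), some x, 1)

-- B's trailing 'if run > 0: templist.append(...)'
def pvBFin (weight : Int) (s : List (List Int) × Option Int × Int) : List (List Int) :=
  if 0 < s.2.2 then s.1 ++ [[(s.2.1).getD 0, s.2.2 * weight]] else s.1

def FrequencyFinder_alt (List_ : List Int) (weight : Int) : List (List Int) :=
  pvBFin weight
    ((PySem.List.sorted List_ (fun x => x) false).foldl (pvBStep weight) ([], none, 0))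

-- ===== PRECONDITION & SPEC =====
-- Pre_ excludes only the empty list, on which A raises IndexError (List[0]).
def Pre_FrequencyFinder (List_ : List Int) (weight : Int) : Prop := List_ ≠ []
instance (List_ : List Int) (weight : Int) : Decidable (Pre_FrequencyFinder List_ weight) := by unfold Pre_FrequencyFinder; infer_instance
def pvWitness_FrequencyFinder : List Int × Int := ([3, 1, 2, 1, 1], 2)

-- On the empty list A raises IndexError (it indexes List[0]); B returns [].
def Raises_FrequencyFinder (List_ : List Int) (weight : Int) : Prop := List_ = []
instance (List_ : List Int) (weight : Int) : Decidable (Raises_FrequencyFinder List_ weight) := by unfold Raises_FrequencyFinder; infer_instance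
def pvRaiseWitness_FrequencyFinder : List Int × Int := ([], 1)
def pvRaiseWitnessOut_FrequencyFinder : List (List Int) := []

def Spec_FrequencyFinder (List_ : List Int) (weight : Int) (out : List (List Int)) : Prop := out = FrequencyFinder_alt List_ weight
instance (List_ : List Int) (weight : Int) (out : List (List Int)) : Decidable (Spec_FrequencyFinder List_ weight out) := by unfold Spec_FrequencyFinder; infer_instance

-- ===== CLAIM (what is proved, stated in full; the proofs are below) =====
def Claim_equal_FrequencyFinder : Prop := ∀ (List_ : List Int) (weight : Int), Dom_FrequencyFinder List_ weight → Pre_FrequencyFinder List_ weight → Spec_FrequencyFinder List_ weight (FrequencyFinder List_ weight)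
def Claim_raises_FrequencyFinder : Prop := (∀ (List_ : List Int) (weight : Int), Dom_FrequencyFinder List_ weight → Raises_FrequencyFinder List_ weight → ¬ Pre_FrequencyFinder List_ weight) ∧ (Dom_FrequencyFinder (pvRaiseWitness_FrequencyFinder.1) (pvRaiseWitness_FrequencyFinder.2) ∧ Raises_FrequencyFinder (pvRaiseWitness_FrequencyFinder.1) (pvRaiseWitness_FrequencyFinder.2) ∧ FrequencyFinder_alt (pvRaiseWitness_FrequencyFinder.1) (pvRaiseWitness_FrequencyFinder.2) = pvRaiseWitnessOut_FrequencyFinder)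

-- ===== LEMMAS AND PROOFS =====

/-- Adjacent pairs of `x :: xs`: `(x, xs[0]), (xs[0], xs[1]), …`. -/
def pvAdj (x : Int) : List Int → List (Int × Int)
  | [] => []
  | y :: ys => (x, y) :: pvAdj y ys

/-- Run-length decomposition with a current run `(v, k)` open. -/
def pvRunsGo : List Int → Int → Int → List (Int × Int)
  | [], v, k => [(v, k)]
  | y :: ys, v, k => if y = v then pvRunsGo ys v (k + 1) else (v, k) :: pvRunsGo ys y 1

theorem pvRunsGo_fst_mem : ∀ (ys : List Int) (v k : Int) (p : Int × Int),
    p ∈ pvRunsGo ys v k → p.1 = v ∨ p.1 ∈ ys := by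
  intro ys
  induction ys with
  | nil =>
    intro v k p hp
    have hpv : p = (v, k) := by simpa [pvRunsGo] using hp
    exact Or.inl (by simp [hpv])
  | cons y ys ih =>
    intro v k p hp
    simp only [pvRunsGo] at hp
    by_cases h : y = v
    · rw [if_pos h] at hp
      rcases ih v (k + 1) p hp with h' | h'
      · exact Or.inl h'
      · exact Or.inr (List.mem_cons_of_mem _ h')
    · rw [if_neg h, List.mem_cons] at hp
      rcases hp with hp | hp
      · exact Or.inl (by simp [hp])
      · rcases ih y 1 p hp with h' | h'
        · exact Or.inr (by simp [h'])
        · exact Or.inr (List.mem_cons_of_mem _ h')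

/-- On a sorted tail, the recorded run length is the total count (plus the open run). -/
theorem pvRunsGo_count : ∀ (ys : List Int) (v k : Int),
    ((v :: ys).Pairwise (· ≤ ·)) →
    ∀ p ∈ pvRunsGo ys v k, p.2 = (ys.count p.1 : Int) + (if p.1 = v then k else 0) := by
  intro ys
  induction ys with
  | nil =>
    intro v k _ p hp
    have hpv : p = (v, k) := by simpa [pvRunsGo] using hp
    simp [hpv]
  | cons y ys ih =>
    intro v k hsort p hp
    have hvy : v ≤ y := (List.pairwise_cons.1 hsort).1 y (by simp)
    have hsort' : (y :: ys).Pairwise (· ≤ ·) := (List.pairwise_cons.1 hsort).2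
    simp only [pvRunsGo] at hp
    by_cases heq : y = v
    · rw [if_pos heq] at hp
      subst heq
      rw [ih y (k + 1) hsort' p hp]
      by_cases hpv : p.1 = y <;> simp [List.count_cons, hpv] <;> omega
    · rw [if_neg heq, List.mem_cons] at hp
      have hne : y ≠ v := heq
      have hvy' : v < y := lt_of_le_of_ne hvy (fun h => hne h.symm)
      rcases hp with hp | hp
      · subst hp
        have hnotin : v ∉ y :: ys := by
          intro hmem
          rw [List.mem_cons] at hmem
          rcases hmem with h' | h'
          · exact hne h'.symm
          · have := (List.pairwise_cons.1 hsort').1 v h'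
            omega
        simp [List.count_eq_zero_of_not_mem hnotin]
      · have hval := ih y 1 hsort' p hp
        have hp1 : p.1 = y ∨ p.1 ∈ ys := pvRunsGo_fst_mem ys y 1 p hp
        have hpv : p.1 ≠ v := by
          rcases hp1 with h | h
          · omega
          · have := (List.pairwise_cons.1 hsort').1 p.1 h
            omega
        rw [hval]
        by_cases hpy : p.1 = y <;> simp [List.count_cons, hpy, hpv] <;> omega

/-- The first element together with the right ends of unequal adjacent pairs are
    exactly the run values. -/
theorem pvAdj_filter_fst : ∀ (xs : List Int) (x k : Int),
    x :: ((pvAdj x xs).filter (fun p => decide ¬(p.2 = p.1))).map Prod.snd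
      = (pvRunsGo xs x k).map Prod.fst := by
  intro xs
  induction xs with
  | nil => intro x k; simp [pvAdj, pvRunsGo]
  | cons y ys ih =>
    intro x k
    by_cases h : y = x
    · subst h
      simp only [pvAdj, pvRunsGo, List.filter_cons]
      simpa using ih y (k + 1)
    · simp only [pvAdj, pvRunsGo, if_neg h, List.filter_cons]
      rw [if_pos (by simpa using h)]
      simp only [List.map_cons]
      exact congrArg (x :: ·) (ih y 1)

/-- Index-fold over `range xs.length` comparing `(x::xs)[k]` with `xs[k]` equals the
    structural fold over adjacent pairs. -/
theorem pvRangeFold_adj {β : Type} : ∀ (xs : List Int) (x : Int) (F : Int → Int → β → β) (init : β),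
    (List.range xs.length).foldl (fun acc k => F ((x :: xs).getD k 0) (xs.getD k 0) acc) init
      = (pvAdj x xs).foldl (fun acc p => F p.1 p.2 acc) init := by
  intro xs
  induction xs with
  | nil => intro x F init; simp [pvAdj]
  | cons y ys ih =>
    intro x F init
    rw [List.length_cons, List.range_succ_eq_map]
    simp only [List.foldl_cons, List.foldl_map, List.getD_cons_zero, List.getD_cons_succ, pvAdj]
    exact ih y F (F x y init)

/-- A fold that conditionally appends = filter-then-map. -/
theorem pvFoldAppendIte {α β : Type} (P : α → Prop) [DecidablePred P] (f : α → β) :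
    ∀ (l : List α) (init : List β),
    l.foldl (fun acc y => if P y then acc ++ [f y] else acc) init
      = init ++ (l.filter (fun y => decide (P y))).map f := by
  intro l
  induction l with
  | nil => intro init; simp
  | cons a l ih =>
    intro l_init
    simp only [List.foldl_cons, List.filter_cons]
    by_cases h : P a
    · simp [h, ih, List.append_assoc]
    · simp [h, ih]

/-- B's loop invariant: from an open run `(v, k)` (`0 < k`), the fold plus finalization
    emits exactly the remaining runs. -/
theorem pvBgo (weight : Int) : ∀ (ys : List Int) (out : List (List Int)) (v k : Int), 0 < k →
    pvBFin weight (ys.foldl (pvBStep weight) (out, some v, k))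
      = out ++ (pvRunsGo ys v k).map (fun p => [p.1, p.2 * weight]) := by
  intro ys
  induction ys with
  | nil => intro out v k hk; simp [pvBFin, pvRunsGo, hk]
  | cons y ys ih =>
    intro out v k hk
    simp only [List.foldl_cons, pvRunsGo]
    by_cases h : y = v
    · subst h
      rw [show pvBStep weight (out, some y, k) y = (out, some y, k + 1) by
        simp [pvBStep, hk]]
      rw [if_pos rfl]
      exact ih out y (k + 1) (by omega)
    · have hvne : v ≠ y := fun h' => h h'.symm
      rw [show pvBStep weight (out, some v, k) y = (out ++ [[v, k * weight]], some y, 1) by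
        simp [pvBStep, hk, hvne]]
      rw [if_neg h, ih (out ++ [[v, k * weight]]) y 1 (by omega)]
      simp [List.append_assoc]

/-- Main: on a nonempty sorted list the two computations agree. -/
theorem pvMain (List_ : List Int) (weight : Int) (hne : List_ ≠ []) :
    FrequencyFinder List_ weight = FrequencyFinder_alt List_ weight := by
  have hLne : PySem.List.sorted List_ (fun x => x) false ≠ [] := by
    simpa [PySem.List.sorted_eq_nil_iff] using hne
  obtain ⟨x, xs, hL⟩ := List.exists_cons_of_ne_nil hLne
  have hsort : ((x :: xs) : List Int).Pairwise (· ≤ ·) := by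
    have := PySem.List.sorted_pairwise (xs := List_) (key := fun x => x)
    rw [hL] at this
    exact this
  -- A side: A's output is the run values, each with its global count
  have hA : FrequencyFinder List_ weight
      = (pvRunsGo xs x 1).map (fun p => [p.1, ((x :: xs).count p.1 : Int) * weight]) := by
    unfold FrequencyFinder pvABody
    rw [hL, PySem.List.len_eq, PySem.List.pyRange_one]
    have hlen : (((x :: xs).length : Int) - 1).toNat = xs.length := by simp
    rw [hlen, List.foldl_map]
    rw [PySem.List.foldl_congr_mem' (List.range xs.length) _
      (fun (acc : List (List Int)) (k : Nat) =>
        if ¬ (xs.getD k 0 = (x :: xs).getD k 0) then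
          acc ++ [[xs.getD k 0, (((x :: xs).count (xs.getD k 0) : Int)) * weight]]
        else acc) _
      (by
        intro k _ acc
        have h1 : (1 + (k : Int)) = ((k + 1 : Nat) : Int) := by push_cast; ring
        have h2 : ((k + 1 : Nat) : Int) - 1 = ((k : Nat) : Int) := by push_cast; ring
        simp only [pvAStep, h1, h2, PySem.List.pyGetD_natCast, PySem.List.count_eq,
          List.getD_cons_succ])]
    rw [pvRangeFold_adj xs x
      (fun a b acc => if ¬ (b = a) then acc ++ [[b, (((x :: xs).count b : Int)) * weight]] else acc)]
    rw [pvFoldAppendIte (fun p : Int × Int => ¬ (p.2 = p.1))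
      (fun p => [p.2, (((x :: xs).count p.2 : Int)) * weight])]
    simp only [PySem.List.pyGetD_zero_cons, PySem.List.count_eq, List.nil_append]
    rw [show ([[x, ((x :: xs).count x : Int) * weight]] : List (List Int))
          ++ ((pvAdj x xs).filter (fun p => decide ¬(p.2 = p.1))).map
              (fun p => [p.2, (((x :: xs).count p.2 : Int)) * weight])
        = (x :: ((pvAdj x xs).filter (fun p => decide ¬(p.2 = p.1))).map Prod.snd).map
              (fun v => [v, (((x :: xs).count v : Int)) * weight]) by
      simp [List.map_map]]
    rw [pvAdj_filter_fst xs x 1, List.map_map]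
    rfl
  -- B side: B's output is the run values with their run lengths
  have hB : FrequencyFinder_alt List_ weight
      = (pvRunsGo xs x 1).map (fun p => [p.1, p.2 * weight]) := by
    unfold FrequencyFinder_alt
    rw [hL]
    simp only [List.foldl_cons]
    rw [show pvBStep weight ([], none, 0) x = ([], some x, 1) by simp [pvBStep]]
    simpa using pvBgo weight xs [] x 1 one_pos
  rw [hA, hB]
  apply List.map_congr_left
  intro p hp
  have hcount := pvRunsGo_count xs x 1 hsort p hp
  have hc : ((x :: xs).count p.1 : Int) = p.2 := by
    rw [hcount, List.count_cons]
    by_cases h : p.1 = x <;> simp [h] <;> omega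
  rw [hc]

-- ===== VERDICT (by name: the statement is the Claim_ definition above) =====
theorem FrequencyFinder_spec : Claim_equal_FrequencyFinder := by
  intro List_ weight _ hpre
  unfold Spec_FrequencyFinder
  exact pvMain List_ weight hpre

@[simp]
theorem FrequencyFinder_raises : Claim_raises_FrequencyFinder := by
  unfold Claim_raises_FrequencyFinder
  exact ⟨by intro L w _ hr hp; exact hp hr, by decide⟩
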